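-- pv_equiv track=rewrite | github.com/UbiSm/Alexander-Semencha | №3.py | first_vacant_row
-- ===== SOURCE A (Python) =====
-- def first_vacant_row(seats):
--
--     max_count = 0
--     max_row = 0
--     for row_index, row in enumerate(seats, 1):
--         available_seats_count = row.count(0)
--         if available_seats_count > max_count:
--             max_row = row_index
--             max_count = available_seats_count
--
--     return max_row if max_count > 0 else 0, max_count
-- ===== SOURCE B (Python) =====
-- def first_vacant_row(seats):
--     counts = [row.count(0) for row in seats]
--     if not counts or max(counts) == 0:
--         return 0, 0
--     m = max(counts)
--     return counts.index(m) + 1, m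
-- ===== Notes on version B (the rewrite author's own statement) =====
-- stated objective: simpler
-- what changed: Replaces the single running-max loop carrying (max_count, max_row) state with a count table (one count per row) followed by a separate max/first-index selection pass.
import Mathlib
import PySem

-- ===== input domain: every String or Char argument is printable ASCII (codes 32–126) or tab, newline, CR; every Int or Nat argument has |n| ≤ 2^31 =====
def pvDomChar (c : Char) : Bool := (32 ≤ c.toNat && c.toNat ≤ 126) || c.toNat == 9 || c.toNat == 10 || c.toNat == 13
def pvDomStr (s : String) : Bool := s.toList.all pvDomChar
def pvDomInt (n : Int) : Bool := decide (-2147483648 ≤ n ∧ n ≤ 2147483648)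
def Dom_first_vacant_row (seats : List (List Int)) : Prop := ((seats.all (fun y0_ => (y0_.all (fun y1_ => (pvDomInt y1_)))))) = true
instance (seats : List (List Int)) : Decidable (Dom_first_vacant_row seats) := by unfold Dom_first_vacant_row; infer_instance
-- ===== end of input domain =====

-- B splits A's running-max loop into a per-row zero-count table followed by a max / first-index selection pass (objective: simpler).

-- ===== PORT A =====
def first_vacant_row (seats : List (List Int)) : Int × Int :=
  -- state = (max_count, max_row), loop over enumerate(seats, 1)
  let st := (PySem.List.enumerate seats 1).foldl
    (fun (st : Int × Int) p =>
      let available_seats_count : Int := (PySem.List.count p.2 (0 : Int) : Nat)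
      if available_seats_count > st.1 then (available_seats_count, p.1) else st)
    (0, 0)
  ((if st.1 > 0 then st.2 else 0), st.1)

-- ===== PORT B =====
def first_vacant_row_alt (seats : List (List Int)) : Int × Int :=
  let counts := seats.map (fun row => ((PySem.List.count row (0 : Int) : Nat) : Int))
  match PySem.List.max? counts (fun y => y) with
  | none => (0, 0)          -- not counts
  | some m =>
    if m = 0 then (0, 0)    -- max(counts) == 0
    else
      match PySem.List.index? counts m with
      | some i => ((i : Int) + 1, m)
      | none => (0, 0)      -- unreachable: m ∈ counts

-- ===== PRECONDITION & SPEC =====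
def Spec_first_vacant_row (seats : List (List Int)) (out : Int × Int) : Prop := out = first_vacant_row_alt seats
instance (seats : List (List Int)) (out : Int × Int) : Decidable (Spec_first_vacant_row seats out) := by unfold Spec_first_vacant_row; infer_instance

-- ===== CLAIM (what is proved, stated in full; the proofs are below) =====
def Claim_equal_first_vacant_row : Prop := ∀ (seats : List (List Int)), Dom_first_vacant_row seats → Spec_first_vacant_row seats (first_vacant_row seats)

-- ===== LEMMAS AND PROOFS =====

-- abbreviation for A's loop body (proof-side only)
def pvStep (st : Int × Int) (p : Int × List Int) : Int × Int :=
  let c : Int := (PySem.List.count p.2 (0 : Int) : Nat)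
  if c > st.1 then (c, p.1) else st

def pvCnt (row : List Int) : Int := (PySem.List.count row (0 : Int) : Nat)

-- If no row beats the running max, the loop never updates.
theorem pv_loop_stays (rows : List (List Int)) :
    ∀ (i mc mr : Int), (∀ r ∈ rows, pvCnt r ≤ mc) →
    (PySem.List.enumerate rows i).foldl pvStep (mc, mr) = (mc, mr) := by
  induction rows with
  | nil => intro i mc mr _; simp [PySem.List.enumerate_nil]
  | cons r rs ih =>
    intro i mc mr h
    have hr : pvCnt r ≤ mc := h r (by simp)
    simp only [PySem.List.enumerate_cons, List.foldl_cons]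
    have hnot : ¬ (((PySem.List.count r (0 : Int) : Nat) : Int) > mc) := by
      simp only [pvCnt] at hr; omega
    have : pvStep (mc, mr) (i, r) = (mc, mr) := by
      simp only [pvStep]; rw [if_neg hnot]
    rw [this]
    exact ih (i + 1) mc mr (fun x hx => h x (by simp [hx]))

-- max? with identity key returns the max value when a maximum element is known.
theorem pv_max?_of_mem_isMax (cs : List Int) (m : Int)
    (hm : m ∈ cs) (hmax : ∀ x ∈ cs, x ≤ m) :
    PySem.List.max? cs (fun y => y) = some m := by
  cases hcs : PySem.List.max? cs (fun y => y) with
  | none =>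
    rw [PySem.List.max?_eq_none_iff] at hcs
    simp [hcs] at hm
  | some m' =>
    have h1 : m' ∈ cs := PySem.List.max?_mem hcs
    have h2 : m ≤ m' := PySem.List.max?_isMax hcs m hm
    have h3 : m' ≤ m := hmax m' h1
    rw [le_antisymm h3 h2]

-- If the global max m strictly beats the initial running max, A's loop records
-- m and the position (offset i) of its first occurrence.
theorem pv_loop_finds (rows : List (List Int)) :
    ∀ (i mc mr m : Int) (k : Nat),
    PySem.List.max? (rows.map pvCnt) (fun y => y) = some m → mc < m →
    PySem.List.index? (rows.map pvCnt) m = some k →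
    (PySem.List.enumerate rows i).foldl pvStep (mc, mr) = (m, i + k) := by
  induction rows with
  | nil =>
    intro i mc mr m k hmax _ _
    have := PySem.List.max?_mem hmax; simp at this
  | cons r rs ih =>
    intro i mc mr m k hmax hlt hidx
    have hub : ∀ x ∈ (r :: rs).map pvCnt, x ≤ m := PySem.List.max?_isMax hmax
    have hcm : pvCnt r ≤ m := hub _ (by simp)
    simp only [PySem.List.enumerate_cons, List.foldl_cons]
    by_cases hce : pvCnt r = m
    · -- first occurrence is here: k = 0, loop updates and then stays
      have hk0 : k = 0 := by
        rw [List.map_cons, hce, PySem.List.index?_cons_self] at hidx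
        exact (Option.some_inj.mp hidx).symm
      have hstep : pvStep (mc, mr) (i, r) = (m, i) := by
        simp only [pvStep]
        rw [show ((PySem.List.count r (0:Int) : Nat) : Int) = pvCnt r from rfl, hce,
            if_pos (by omega)]
      rw [hstep]
      have := pv_loop_stays rs (i + 1) m i
        (fun x hx => hub (pvCnt x) (by simp; right; exact ⟨x, hx, rfl⟩))
      rw [this, hk0]; simp
    · -- first occurrence is later: m is in rs, recurse
      have hne : pvCnt r ≠ m := hce
      rw [List.map_cons, PySem.List.index?_cons_of_ne (rs.map pvCnt) hne] at hidx
      cases hidx' : PySem.List.index? (rs.map pvCnt) m with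
      | none => rw [hidx'] at hidx; simp at hidx
      | some k' =>
        rw [hidx'] at hidx
        simp only [Option.map_some, Option.some_inj] at hidx
        have hmem : m ∈ rs.map pvCnt := by
          rw [← PySem.List.index?_isSome_iff, hidx']
          rfl
        have hmax' : PySem.List.max? (rs.map pvCnt) (fun y => y) = some m :=
          pv_max?_of_mem_isMax _ _ hmem (fun x hx => hub x (by simp at hx ⊢; right; exact hx))
        by_cases hgt : pvCnt r > mc
        · have hstep : pvStep (mc, mr) (i, r) = (pvCnt r, i) := by
            simp only [pvStep]
            rw [if_pos (by simp only [pvCnt] at hgt; omega)]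
            rfl
          rw [hstep]
          have := ih (i + 1) (pvCnt r) i m k' hmax' (by omega) hidx'
          rw [this, ← hidx]
          simp only [Prod.mk.injEq]
          exact ⟨trivial, by push_cast; ring⟩
        · have hstep : pvStep (mc, mr) (i, r) = (mc, mr) := by
            simp only [pvStep]
            rw [if_neg (by simp only [pvCnt] at hgt; omega)]
          rw [hstep]
          have := ih (i + 1) mc mr m k' hmax' hlt hidx'
          rw [this, ← hidx]
          simp only [Prod.mk.injEq]
          exact ⟨trivial, by push_cast; ring⟩

-- ===== VERDICT (by name: the statement is the Claim_ definition above) =====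
theorem first_vacant_row_spec : Claim_equal_first_vacant_row := by
  intro seats _
  unfold Spec_first_vacant_row first_vacant_row first_vacant_row_alt
  have hA : (fun (st : Int × Int) p =>
      let available_seats_count : Int := (PySem.List.count p.2 (0 : Int) : Nat)
      if available_seats_count > st.1 then (available_seats_count, p.1) else st) = pvStep := rfl
  have hB : (fun row => ((PySem.List.count row (0 : Int) : Nat) : Int)) = pvCnt := rfl
  rw [hA, hB]
  cases hmax : PySem.List.max? (seats.map pvCnt) (fun y => y) with
  | none =>
    rw [PySem.List.max?_eq_none_iff, List.map_eq_nil_iff] at hmax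
    subst hmax
    simp [PySem.List.enumerate_nil]
    rfl
  | some m =>
    have hnn : (0 : Int) ≤ m := by
      have hmem := PySem.List.max?_mem hmax
      simp only [List.mem_map] at hmem
      obtain ⟨r, _, hr⟩ := hmem
      simp [pvCnt, ← hr]
    by_cases hm0 : m = 0
    · -- all counts are 0: loop never updates
      have := pv_loop_stays seats 1 0 0
        (fun r hr => by
          have := PySem.List.max?_isMax hmax (pvCnt r) (List.mem_map_of_mem hr)
          omega)
      rw [this]
      simp [hmax, hm0]
    · have hpos : (0 : Int) < m := lt_of_le_of_ne hnn (Ne.symm hm0)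
      have hmem : m ∈ seats.map pvCnt := PySem.List.max?_mem hmax
      have hsome : (PySem.List.index? (seats.map pvCnt) m).isSome := by
        rw [PySem.List.index?_isSome_iff]; exact hmem
      cases hidx : PySem.List.index? (seats.map pvCnt) m with
      | none => rw [hidx] at hsome; simp at hsome
      | some k =>
        have := pv_loop_finds seats 1 0 0 m k hmax hpos hidx
        have hidx2 : List.idxOf? m (List.map pvCnt seats) = some k := by
          rw [← PySem.List.index?_eq_idxOf?]; exact hidx
        rw [this]
        simp [hmax, hm0, hidx2, hpos]
        omega
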